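-- pv_equiv track=rewrite | github.com/n7tms/EverybodyCodes | 2025/q6.py | part3
-- ===== SOURCE A (Python) =====
-- def part3(professions):           # => 1667582509
--     # copy the input string 1000 times.
--     # then count all the mentors within 1000 either way of a knight
--
--     # NOTE: This brute-force method takes about ~70 seconds to run.
--
--     all_professions = professions * 1000
--     dist = 1000
--
--     mentors = 0
--     for idx, prof in enumerate(all_professions):
--         if prof.islower():
--             # if the current knight (idx) is "near" the beginning, set the lower limit (lwr) to 0
--             if idx < dist:
--                 lwr = 0
--             else:
--                 lwr = idx-dist
--
--             # if the current knight (idx) is "near" the end, set the upper limit (upr) to the end.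
--             if idx+dist > len(all_professions):
--                 upr = len(all_professions)
--             else:
--                 upr = idx+dist+1
--
--             # count the number of mentors that appear within that range (lwr to upr)
--             mentors += all_professions[lwr:upr].count(prof.upper())
--     return mentors
-- ===== SOURCE B (Python) =====
-- def part3(professions):
--     # Per-letter prefix-count arrays over the repeated string: each knight's
--     # window count becomes one O(1) prefix-sum difference instead of an
--     # O(dist) slice-and-count scan.
--     s = professions * 1000
--     L = len(s)
--     dist = 1000
--     pref = {}
--     for ch in s:
--         if ch.islower() and ch not in pref:
--             u = ch.upper()
--             p = [0]
--             acc = 0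
--             for x in s:
--                 if x == u:
--                     acc += 1
--                 p.append(acc)
--             pref[ch] = p
--     total = 0
--     for idx, ch in enumerate(s):
--         if ch in pref:
--             p = pref[ch]
--             total += p[min(idx + dist + 1, L)] - p[max(idx - dist, 0)]
--     return total
-- ===== Notes on version B (the rewrite author's own statement) =====
-- stated objective: faster
-- what changed: Replaces A's per-knight slice-and-count scan of a 2001-character window with per-letter prefix-count arrays memoized in a dict, so each knight's window count is a single prefix-sum difference.
import Mathlib
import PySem

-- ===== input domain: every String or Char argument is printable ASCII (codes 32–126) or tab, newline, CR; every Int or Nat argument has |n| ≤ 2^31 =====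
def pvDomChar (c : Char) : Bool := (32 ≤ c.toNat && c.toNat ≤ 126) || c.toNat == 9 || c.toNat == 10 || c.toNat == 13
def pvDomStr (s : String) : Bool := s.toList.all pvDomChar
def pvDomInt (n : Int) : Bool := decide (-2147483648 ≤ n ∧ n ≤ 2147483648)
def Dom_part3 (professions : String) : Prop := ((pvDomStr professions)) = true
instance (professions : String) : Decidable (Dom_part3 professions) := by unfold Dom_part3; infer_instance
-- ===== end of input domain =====

-- B replaces A's per-knight slice-and-count of the ±1000 window with per-letter
-- prefix-count arrays memoized in a dict (one prefix-difference per knight);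
-- measurably faster (the window-width scan per knight disappears).

-- ===== PORT A =====
-- `professions * 1000` (string repetition) has no PySem primitive: ported by hand
-- as the concatenation of 1000 copies of the character list (exact).
-- `enumerate(all_professions)` is ported as `List.zipIdx` ((element, index) pairs,
-- index a Nat cast to Int at its uses: enumerate indices are always ≥ 0 here — exact).
def part3 (professions : String) : Int :=
  let allProfessions : List Char := (List.replicate 1000 professions.toList).flatten
  let dist : Int := 1000
  allProfessions.zipIdx.foldl
    (fun (mentors : Int) (pr : Char × Nat) =>
      if PySem.Chars.islower pr.1 then
        let idx : Int := (pr.2 : Int)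
        let lwr : Int := if idx < dist then 0 else idx - dist
        let upr : Int := if idx + dist > (allProfessions.length : Int) then (allProfessions.length : Int)
                         else idx + dist + 1
        mentors + (PySem.Chars.count
          (PySem.List.slice allProfessions (some lwr) (some upr)) [PySem.Chars.upperChar pr.1] : Int)
      else mentors) 0

-- ===== PORT B =====
-- prefix array for letter u: p[k] = number of occurrences of u among the first k characters
-- (the Python list p with its O(1) append/index is ported as Array Int: push = p.append)
def buildPref (u : Char) (s : List Char) : Array Int :=
  (s.foldl (fun (st : Array Int × Int) x =>
      let acc := if x == u then st.2 + 1 else st.2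
      (st.1.push acc, acc)) (#[0], 0)).1

def part3_alt (professions : String) : Int :=
  let s : List Char := (List.replicate 1000 professions.toList).flatten
  let L : Int := (s.length : Int)
  let dist : Int := 1000
  let pref : PySem.Dict Char (Array Int) := s.foldl
    (fun d ch =>
      if PySem.Chars.islower ch && !(d.contains ch) then
        d.insert ch (buildPref (PySem.Chars.upperChar ch) s)
      else d) PySem.Dict.empty
  s.zipIdx.foldl
    (fun (total : Int) (pr : Char × Nat) =>
      match pref.get? pr.1 with
      | some pl =>
          -- indexing p[min(...)], p[max(...)]: both indices are provably ≥ 0 and in range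
          -- here, so `.toNat` and `.getD 0` are totality guards only (proved in pv_pointwise)
          total + (pl[(min ((pr.2 : Int) + dist + 1) L).toNat]?).getD 0
                - (pl[(max ((pr.2 : Int) - dist) 0).toNat]?).getD 0
      | none => total) 0

-- ===== PRECONDITION & SPEC =====
def Spec_part3 (professions : String) (out : Int) : Prop := out = part3_alt professions
instance (professions : String) (out : Int) : Decidable (Spec_part3 professions out) := by unfold Spec_part3; infer_instance

-- ===== CLAIM (what is proved, stated in full; the proofs are below) =====
def Claim_equal_part3 : Prop := ∀ (professions : String), Dom_part3 professions → Spec_part3 professions (part3 professions)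

-- ===== LEMMAS AND PROOFS =====

-- str.count with a single-character needle is the element count
theorem pv_go_singleton (c : Char) : ∀ (fuel : Nat) (l : List Char) (acc : Nat), l.length ≤ fuel →
    PySem.Chars.count.go [c] fuel l acc = acc + l.count c := by
  intro fuel
  induction fuel with
  | zero => intro l acc h; rw [PySem.Chars.count.go]; simp at h; simp [h]
  | succ n ih =>
    intro l acc h
    cases l with
    | nil => rw [PySem.Chars.count.go] <;> simp
    | cons x t =>
      rw [PySem.Chars.count.go]
      simp only [List.length_cons, Nat.add_le_add_iff_right] at h
      by_cases hx : c = x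
      · subst hx
        simp [List.isPrefixOf, ih t (acc + 1) h]
        omega
      · have hbeq : (c == x) = false := beq_eq_false_iff_ne.mpr hx
        have hbeq' : (x == c) = false := beq_eq_false_iff_ne.mpr (fun e => hx e.symm)
        simp [List.isPrefixOf, hbeq, hbeq', ih t acc h, List.count_cons]

theorem pv_count_singleton (l : List Char) (c : Char) :
    PySem.Chars.count l [c] = l.count c := by
  simp [PySem.Chars.count, pv_go_singleton]

-- characterization of B's prefix-building loop
theorem pv_buildPref_fold (u : Char) : ∀ (r : List Char) (p : List Int) (acc : Int),
    r.foldl (fun (st : Array Int × Int) x =>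
        let a := if x == u then st.2 + 1 else st.2
        (st.1.push a, a)) (p.toArray, acc)
      = ((p ++ (List.range r.length).map (fun k => acc + ((r.take (k + 1)).count u : Int))).toArray,
         acc + (r.count u : Int)) := by
  intro r
  induction r with
  | nil => intro p acc; simp
  | cons x t ih =>
    intro p acc
    simp only [List.foldl_cons, List.push_toArray]
    rw [ih]
    simp only [Prod.mk.injEq]
    have hind : (if x == u then acc + 1 else acc) = acc + (if u = x then 1 else 0) := by
      by_cases hx : x = u
      · subst hx; simp
      · have h1 : (x == u) = false := beq_eq_false_iff_ne.mpr hx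
        have h2 : ¬ u = x := fun e => hx e.symm
        simp [h1, h2]
    refine ⟨?_, ?_⟩
    · apply congrArg List.toArray
      simp only [List.length_cons]
      rw [List.range_succ_eq_map]
      simp only [List.map_cons, List.map_map]
      conv_rhs => rw [List.append_cons]
      congr 1
      · congr 1
        simp [List.count_cons]
        split_ifs <;> simp_all
      · apply List.map_congr_left
        intro k _
        simp only [Function.comp_apply, List.take_succ_cons, List.count_cons, hind]
        push_cast
        by_cases hu : u = x
        · simp [hu]; omega
        · simp [hu]; exact fun e => hu e.symm
    · rw [hind, List.count_cons]
      push_cast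
      by_cases hu : u = x
      · simp [hu]; omega
      · simp [hu]; exact fun e => hu e.symm

theorem pv_buildPref_eq (u : Char) (s : List Char) :
    buildPref u s = ((List.range (s.length + 1)).map (fun k => ((s.take k).count u : Int))).toArray := by
  unfold buildPref
  rw [show (#[0] : Array Int) = ([0] : List Int).toArray from rfl, pv_buildPref_fold]
  apply congrArg List.toArray
  rw [List.range_succ_eq_map]
  simp [List.map_map, Function.comp]

theorem pv_buildPref_get (u : Char) (s : List Char) (k : Nat) (hk : k ≤ s.length) :
    (buildPref u s)[k]? = some ((s.take k).count u : Int) := by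
  rw [pv_buildPref_eq, List.getElem?_toArray]
  rw [List.getElem?_map]
  rw [List.getElem?_range (by omega)]
  rfl

-- the memoizing dict B builds: lookup succeeds exactly on lowercase letters that occur
theorem pv_memo_get (s : List Char) : ∀ (t : List Char) (d : PySem.Dict Char (Array Int)) (c : Char),
    (t.foldl (fun d ch =>
        if PySem.Chars.islower ch && !(d.contains ch) then
          d.insert ch (buildPref (PySem.Chars.upperChar ch) s)
        else d) d).get? c
      = if PySem.Chars.islower c = true ∧ c ∈ t ∧ d.contains c = false
        then some (buildPref (PySem.Chars.upperChar c) s) else d.get? c := by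
  intro t
  induction t with
  | nil => intro d c; simp
  | cons x t ih =>
    intro d c
    simp only [List.foldl_cons]
    rw [ih]
    by_cases hcx : c = x
    · subst hcx
      by_cases hl : PySem.Chars.islower c <;> by_cases hc : d.contains c
      · simp [hl, hc]
      · simp [hl, hc, PySem.Dict.contains_insert_self, PySem.Dict.get?_insert_self]
      · simp [hl, hc]
      · simp [hl, hc]
    · by_cases hstep : (PySem.Chars.islower x && !(d.contains x)) = true
      · simp only [hstep, if_true]
        have hcont : ((d.insert x (buildPref (PySem.Chars.upperChar x) s)).contains c) = d.contains c := by
          rw [PySem.Dict.contains_insert]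
          have : (c == x) = false := beq_eq_false_iff_ne.mpr hcx
          simp [this]
        have hget : ((d.insert x (buildPref (PySem.Chars.upperChar x) s)).get? c) = d.get? c := by
          rw [PySem.Dict.get?_insert]; simp [hcx]
        rw [hcont, hget]
        simp only [List.mem_cons, hcx, false_or]
      · rw [if_neg hstep]
        simp only [List.mem_cons, hcx, false_or]

-- every pair produced by zipIdx has its index in range and its element in the list
theorem pv_mem_zipIdx (l : List Char) (c : Char) (k : Nat) (h : (c, k) ∈ l.zipIdx) :
    k < l.length ∧ c ∈ l := by
  obtain ⟨-, h2, h3⟩ := List.mem_zipIdx h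
  refine ⟨by omega, ?_⟩
  rw [h3]
  exact List.getElem_mem _

-- count over a window = difference of prefix counts
theorem pv_count_drop_take (l : List Char) (c : Char) (a b : Nat) (h : a ≤ b) :
    (((l.take b).drop a).count c : Int) = ((l.take b).count c : Int) - ((l.take a).count c : Int) := by
  have hsplit : l.take b = l.take a ++ (l.take b).drop a := by
    conv_lhs => rw [← List.take_append_drop a (l.take b)]
    rw [List.take_take, min_eq_left h]
  have := congrArg (List.count c) hsplit
  rw [List.count_append] at this
  push_cast [this]
  ring

-- per-knight agreement: A's slice count equals B's prefix difference
theorem pv_pointwise (s : List Char) (ch : Char) (i : Int) (h0 : 0 ≤ i) (hL : i < (s.length : Int)) :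
    (PySem.Chars.count
        (PySem.List.slice s (some (if i < 1000 then 0 else i - 1000))
          (some (if i + 1000 > (s.length : Int) then (s.length : Int) else i + 1000 + 1)))
        [PySem.Chars.upperChar ch] : Int)
      = ((buildPref (PySem.Chars.upperChar ch) s)[(min (i + 1000 + 1) (s.length : Int)).toNat]?).getD 0
        - ((buildPref (PySem.Chars.upperChar ch) s)[(max (i - 1000) 0).toNat]?).getD 0 := by
  set u := PySem.Chars.upperChar ch with hu
  set lwr : Int := if i < 1000 then 0 else i - 1000 with hlwr
  set upr : Int := if i + 1000 > (s.length : Int) then (s.length : Int) else i + 1000 + 1 with hupr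
  have hlwr0 : 0 ≤ lwr := by rw [hlwr]; split_ifs <;> omega
  have hupr0 : 0 ≤ upr := by rw [hupr]; split_ifs <;> omega
  have hlwr_eq : lwr = max (i - 1000) 0 := by rw [hlwr]; split_ifs <;> omega
  have hab : lwr.toNat ≤ upr.toNat := by
    rw [hlwr, hupr]; split_ifs <;> omega
  -- left side: slice → drop/take → prefix difference
  rw [pv_count_singleton, PySem.List.slice_toNat s hlwr0 hupr0, ← List.drop_take,
    pv_count_drop_take s u lwr.toNat upr.toNat hab]
  -- right side: evaluate the two prefix-array lookups
  set hi : Int := min (i + 1000 + 1) (s.length : Int) with hhi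
  have hhi0 : 0 ≤ hi := by rw [hhi]; omega
  have hhiL : hi.toNat ≤ s.length := by rw [hhi]; omega
  have hloL : lwr.toNat ≤ s.length := by rw [hlwr]; split_ifs <;> omega
  have e1 := pv_buildPref_get u s hi.toNat hhiL
  have e2 := pv_buildPref_get u s lwr.toNat hloL
  rw [e1, ← hlwr_eq, e2]
  simp only [Option.getD_some]
  -- the clamped upper bounds cut the same prefix
  have htake : s.take upr.toNat = s.take hi.toNat := by
    rw [List.take_eq_take_iff]
    rw [hupr, hhi]; split_ifs <;> omega
  rw [htake]

-- ===== VERDICT (by name: the statement is the Claim_ definition above) =====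
theorem part3_spec : Claim_equal_part3 := by
  intro professions _hdom
  unfold Spec_part3 part3 part3_alt
  simp only []
  set s : List Char := (List.replicate 1000 professions.toList).flatten with hs
  apply PySem.List.foldl_congr_mem
  intro acc p hp
  obtain ⟨c, k⟩ := p
  rcases pv_mem_zipIdx s c k hp with ⟨h1, h2⟩
  by_cases hl : PySem.Chars.islower c
  · have hget : (s.foldl (fun d ch =>
        if PySem.Chars.islower ch && !(d.contains ch) then
          d.insert ch (buildPref (PySem.Chars.upperChar ch) s)
        else d) PySem.Dict.empty).get? c
        = some (buildPref (PySem.Chars.upperChar c) s) := by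
      rw [pv_memo_get s s PySem.Dict.empty c]
      exact if_pos ⟨hl, h2, PySem.Dict.contains_empty c⟩
    simp only [hget, hl, if_true]
    rw [pv_pointwise s c (k : Int) (by omega) (by omega)]
    ring
  · have hlb : PySem.Chars.islower c = false := by
      simpa using hl
    have hget : (s.foldl (fun d ch =>
        if PySem.Chars.islower ch && !(d.contains ch) then
          d.insert ch (buildPref (PySem.Chars.upperChar ch) s)
        else d) PySem.Dict.empty).get? c = none := by
      rw [pv_memo_get s s PySem.Dict.empty c, if_neg (by simp [hlb]),
        PySem.Dict.get?_empty]
    rw [if_neg hl]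
    simp only [hget]
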